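-- pv_equiv track=rewrite | github.com/kino-ma/pukiwiki-export | pukiwiki/__init__.py | convert_codeblock
-- ===== SOURCE A (Python) =====
-- def convert_codeblock(src: str):
--     lines = src.split("\n")
--
--     start, end = None, None
--     starts = []
--     ends = []
--
--     for i, line in enumerate(lines):
--         # We find a code block
--         if line.startswith(" "):
--             # trim space
--             lines[i] = line[1:]
--
--             # If the first line of code block
--             if start is None:
--                 start = i
--
--             # Continue reading code block
--             elif line.startswith(" ") and start is not None:
--                 continue
--
--         # End reading code block
--         elif not line.startswith(" ") and start is not None:
--             starts.append(start)
--             ends.append(i)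
--             start, end = None, None
--         else:
--             continue
--
--     # Iterate from end of the list.
--     # Because we are inserting new elements and alder indeices will be destroyed.
--     for start, end in list(zip(starts, ends))[::-1]:
--         lines.insert(end, "```")
--         lines.insert(start, "```")
--
--     return "\n".join(lines)
-- ===== SOURCE B (Python) =====
-- def convert_codeblock(src: str):
--     out = []
--     buf = []
--     for line in src.split("\n"):
--         if line.startswith(" "):
--             buf.append(line[1:])
--         else:
--             if buf:
--                 out.append("```")
--                 out.extend(buf)
--                 out.append("```")
--                 buf = []
--             out.append(line)
--     if buf:
--         out.extend(buf)
--     return "\n".join(out)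
-- ===== Notes on version B (the rewrite author's own statement) =====
-- stated objective: simpler
-- what changed: A scans lines recording (start, end) index ranges of indented blocks and then splices fence markers into the list with index-based insert calls processed back-to-front; B does a single forward pass with an output list and a current-block buffer, emitting the fences inline, and flushes a trailing unterminated block unfenced.
import Mathlib
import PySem

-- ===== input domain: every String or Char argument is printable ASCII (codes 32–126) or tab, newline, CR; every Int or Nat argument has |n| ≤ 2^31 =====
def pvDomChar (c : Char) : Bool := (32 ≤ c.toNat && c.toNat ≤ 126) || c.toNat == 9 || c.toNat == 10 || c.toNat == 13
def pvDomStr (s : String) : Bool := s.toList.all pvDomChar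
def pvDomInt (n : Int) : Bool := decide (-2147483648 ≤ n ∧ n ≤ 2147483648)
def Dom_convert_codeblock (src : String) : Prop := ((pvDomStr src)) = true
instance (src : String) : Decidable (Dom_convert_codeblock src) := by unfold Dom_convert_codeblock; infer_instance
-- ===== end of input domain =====

-- B replaces A's two-pass scheme (record block index ranges, then insert fences back-to-front
-- with list.insert) by a single forward pass with an output list and a current-block buffer; simpler.

-- ===== PORT A =====
-- one step of A's for-loop: state = (lines, start, starts, ends), item = (i, line);
-- the loop's `elif line.startswith(" ") and start is not None: continue` and final `else: continue`
-- branches are no-ops and fold into the two real branches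
def cbAStep (s : List String × Option Int × List Int × List Int) (p : Int × String) :
    List String × Option Int × List Int × List Int :=
  if PySem.Str.startswith p.2 " " then
    -- lines[i] = line[1:]; start = i if start is None
    (s.1.set p.1.toNat (PySem.Str.slice p.2 (some 1) none),
     (if s.2.1.isNone then some p.1 else s.2.1), s.2.2.1, s.2.2.2)
  else if s.2.1.isSome then
    (s.1, none, s.2.2.1 ++ [s.2.1.get!], s.2.2.2 ++ [p.1])
  else s

def convert_codeblock (src : String) : String :=
  let lines := (PySem.Str.split? src "\n").getD []   -- sep = "\n" ≠ "", so split? is `some`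
  let st := (PySem.List.enumerate lines 0).foldl cbAStep (lines, none, [], [])
  let lines :=
    ((st.2.2.1.zip st.2.2.2).reverse).foldl
      (fun ls se => PySem.List.insert (PySem.List.insert ls se.2 "```") se.1 "```") st.1
  PySem.Str.join "\n" lines

-- ===== PORT B =====
-- one step of B's for-loop: state = (out, buf)
def cbBStep (s : List String × List String) (line : String) : List String × List String :=
  if PySem.Str.startswith line " " then
    (s.1, s.2 ++ [PySem.Str.slice line (some 1) none])
  else if s.2 ≠ [] then
    (s.1 ++ ["```"] ++ s.2 ++ ["```", line], [])
  else (s.1 ++ [line], s.2)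

def convert_codeblock_alt (src : String) : String :=
  let lines := (PySem.Str.split? src "\n").getD []   -- sep = "\n" ≠ "", so split? is `some`
  let st := lines.foldl cbBStep ([], [])
  PySem.Str.join "\n" (if st.2 ≠ [] then st.1 ++ st.2 else st.1)

-- ===== PRECONDITION & SPEC =====
def Spec_convert_codeblock (src : String) (out : String) : Prop := out = convert_codeblock_alt src
instance (src : String) (out : String) : Decidable (Spec_convert_codeblock src out) := by unfold Spec_convert_codeblock; infer_instance

-- ===== CLAIM (what is proved, stated in full; the proofs are below) =====
def Claim_equal_convert_codeblock : Prop := ∀ (src : String), Dom_convert_codeblock src → Spec_convert_codeblock src (convert_codeblock src)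

-- ===== LEMMAS AND PROOFS =====

-- proof-side model of A's scan: absolute index, open-block start, emitted (start, end) pairs
def cbScan : Int → Option Int → List String → List (Int × Int) × Option Int
  | _, st, [] => ([], st)
  | i, st, l :: ls =>
    if PySem.Str.startswith l " " then
      cbScan (i+1) (if st.isNone then some i else st) ls
    else match st with
      | some s => let r := cbScan (i+1) none ls; ((s, i) :: r.1, r.2)
      | none => cbScan (i+1) none ls
-- A's in-place trim, as the per-line function it amounts to
def cbTrimIf (l : String) : String :=
  if PySem.Str.startswith l " " then PySem.Str.slice l (some 1) none else l

-- A's fence-insert pass, in foldr form over (start, end) pairs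
def cbFence (bs : List (Int × Int)) (L : List String) : List String :=
  bs.foldr (fun se acc => PySem.List.insert (PySem.List.insert acc se.2 "```") se.1 "```") L

-- recursive model of B's pass
def cbRec : List String → List String → List String
  | [], buf => buf
  | l :: ls, buf =>
    if PySem.Str.startswith l " " then cbRec ls (buf ++ [PySem.Str.slice l (some 1) none])
    else (if buf ≠ [] then ["```"] ++ buf ++ ["```"] else []) ++ l :: cbRec ls []

-- A's loop = per-line trim + cbScan
theorem cbA_loop (ls : List String) : ∀ (pre : List String) (st : Option Int) (ss es : List Int),
    (PySem.List.enumerate ls (pre.length : Int)).foldl cbAStep (pre ++ ls, st, ss, es)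
      = (pre ++ ls.map cbTrimIf, (cbScan (pre.length : Int) st ls).2,
         ss ++ ((cbScan (pre.length : Int) st ls).1).map Prod.fst,
         es ++ ((cbScan (pre.length : Int) st ls).1).map Prod.snd) := by
  induction ls with
  | nil => intro pre st ss es; simp [PySem.List.enumerate, cbScan]
  | cons l ls ih =>
    intro pre st ss es
    rw [PySem.List.enumerate_cons]
    simp only [List.foldl_cons]
    have harith : (pre.length : Int) + 1 = (((pre ++ [l]).length : Nat) : Int) := by simp
    cases hs : PySem.Str.startswith l " " with
    | true =>
      have hs' : PySem.Chars.startswith l.toList [' '] = true := by simpa using hs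
      have hset : (pre ++ l :: ls).set ((pre.length : Int)).toNat (PySem.Str.slice l (some 1) none)
          = (pre ++ [PySem.Str.slice l (some 1) none]) ++ ls := by simp
      have harith' : (pre.length : Int) + 1
          = (((pre ++ [PySem.Str.slice l (some 1) none]).length : Nat) : Int) := by simp
      cases st with
      | none =>
        simp only [cbAStep, hs, if_true, hset, Option.isNone_none, cbScan]
        rw [harith', ih]
        have hlen : ((pre ++ [PySem.Str.slice l (some 1) none]).length : Int) = (pre.length : Int) + 1 := by simp
        simp [cbTrimIf, hs, hs', hlen]
      | some s =>
        simp only [cbAStep, hs, if_true, hset, Option.isNone_some, Bool.false_eq_true, if_false, cbScan]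
        rw [harith', ih]
        have hlen : ((pre ++ [PySem.Str.slice l (some 1) none]).length : Int) = (pre.length : Int) + 1 := by simp
        simp [cbTrimIf, hs, hs', hlen]
    | false =>
      have hs' : PySem.Chars.startswith l.toList [' '] = false := by simpa using hs
      cases st with
      | none =>
        simp only [cbAStep, hs, Bool.false_eq_true, if_false, Option.isSome_none, cbScan]
        have : pre ++ l :: ls = (pre ++ [l]) ++ ls := by simp
        rw [this, harith, ih]
        have hlen : ((pre ++ [l]).length : Int) = (pre.length : Int) + 1 := by simp
        simp [cbTrimIf, hs, hs', hlen]
      | some s =>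
        simp only [cbAStep, hs, Bool.false_eq_true, if_false, Option.isSome_some, if_true,
          Option.get!, cbScan]
        have : pre ++ l :: ls = (pre ++ [l]) ++ ls := by simp
        rw [this, harith, ih]
        have hlen : ((pre ++ [l]).length : Int) = (pre.length : Int) + 1 := by simp
        simp [cbTrimIf, hs, hs', hlen]

-- B's loop (with its final unfenced-buffer flush) = cbRec
theorem cbB_loop (ls : List String) : ∀ (out buf : List String),
    (let st := ls.foldl cbBStep (out, buf);
     if st.2 ≠ [] then st.1 ++ st.2 else st.1) = out ++ cbRec ls buf := by
  induction ls with
  | nil => intro out buf; by_cases h : buf = [] <;> simp [cbRec, h]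
  | cons l ls ih =>
    intro out buf
    simp only [List.foldl_cons]
    cases hs : PySem.Str.startswith l " " with
    | true =>
      simp only [cbBStep, hs, if_true, cbRec]
      rw [ih]
    | false =>
      by_cases hb : buf = []
      · simp only [cbBStep, hs, cbRec, Bool.false_eq_true, if_false, hb, ne_eq,
          not_true_eq_false, ite_false, ite_true, not_false_eq_true]
        rw [ih]
        simp
      · simp only [cbBStep, hs, cbRec, Bool.false_eq_true, if_false, ne_eq, hb,
          not_false_eq_true, ite_true]
        rw [ih]
        simp

-- the heart: A's fence-insert pass over the trimmed lines equals B's interleaved output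
theorem cbFence_scan (ls : List String) : ∀ (pre buf : List String),
    cbFence (cbScan (((pre.length + buf.length : Nat) : Int))
        (if buf = [] then none else some ((pre.length : Nat) : Int)) ls).1
        (pre ++ buf ++ ls.map cbTrimIf)
      = pre ++ cbRec ls buf := by
  induction ls with
  | nil => intro pre buf; by_cases hb : buf = [] <;> simp [cbScan, cbFence, cbRec, hb]
  | cons l ls ih =>
    intro pre buf
    cases hs : PySem.Str.startswith l " " with
    | true =>
      have hs' : PySem.Chars.startswith l.toList [' '] = true := by simpa using hs
      by_cases hb : buf = []
      · subst hb
        simp only [cbScan, hs, if_true, cbRec, List.append_nil, if_neg, Option.isNone_none,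
          List.length_nil, Nat.add_zero]
        have h1 : ((pre.length : Nat) : Int) + 1
            = ((pre.length + [PySem.Str.slice l (some 1) none].length : Nat) : Int) := by simp
        rw [h1]
        have := ih pre [PySem.Str.slice l (some 1) none]
        simp only [List.cons_ne_self, if_false] at this
        simp only [List.map_cons, cbTrimIf, hs, if_true, ite_true] at this ⊢
        rw [show pre ++ PySem.Str.slice l (some 1) none :: List.map cbTrimIf ls
              = pre ++ [PySem.Str.slice l (some 1) none] ++ List.map cbTrimIf ls by simp]
        rw [this]
        simp
      · simp only [cbScan, hs, if_true, cbRec, hb, if_neg, Option.isNone_some, ite_false]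
        have h1 : ((pre.length + buf.length : Nat) : Int) + 1
            = ((pre.length + (buf ++ [PySem.Str.slice l (some 1) none]).length : Nat) : Int) := by
          simp; ring
        rw [h1]
        have := ih pre (buf ++ [PySem.Str.slice l (some 1) none])
        have hb2 : buf ++ [PySem.Str.slice l (some 1) none] ≠ [] := by simp
        simp only [hb2, if_false, ite_false] at this
        simp only [List.map_cons, cbTrimIf, hs, if_true, ite_true] at this ⊢
        rw [show pre ++ buf ++ PySem.Str.slice l (some 1) none :: List.map cbTrimIf ls
              = pre ++ (buf ++ [PySem.Str.slice l (some 1) none]) ++ List.map cbTrimIf ls by simp]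
        rw [show (if false = true then some ((pre.length + buf.length : Nat) : Int)
                  else some ((pre.length : Nat) : Int)) = some ((pre.length : Nat) : Int) by simp]
        rw [this]
    | false =>
      have hs' : PySem.Chars.startswith l.toList [' '] = false := by simpa using hs
      by_cases hb : buf = []
      · subst hb
        simp only [cbScan, hs, Bool.false_eq_true, if_false, cbRec, List.append_nil, ne_eq,
          not_true_eq_false, ite_false, List.nil_append, List.length_nil, Nat.add_zero,
          Option.isNone_none, ite_true]
        have h1 : ((pre.length : Nat) : Int) + 1
            = (((pre ++ [l]).length + ([] : List String).length : Nat) : Int) := by simp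
        rw [h1]
        have := ih (pre ++ [l]) []
        simp only [ite_true, List.append_nil] at this
        simp only [List.map_cons, cbTrimIf, hs, Bool.false_eq_true, if_false, ite_false] at this ⊢
        rw [show pre ++ l :: List.map cbTrimIf ls = pre ++ [l] ++ List.map cbTrimIf ls by simp, this]
        simp
      · simp only [cbScan, hs, Bool.false_eq_true, if_false, hb, ite_false, cbRec, ne_eq,
          not_false_eq_true, ite_true]
        have h1 : ((pre.length + buf.length : Nat) : Int) + 1
            = (((pre ++ buf ++ [l]).length + ([] : List String).length : Nat) : Int) := by simp; ring
        rw [h1]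
        have hrest := ih (pre ++ buf ++ [l]) []
        simp only [ite_true, List.append_nil] at hrest
        simp only [cbFence, List.foldr_cons] at *
        rw [show pre ++ buf ++ List.map cbTrimIf (l :: ls)
              = pre ++ buf ++ [l] ++ List.map cbTrimIf ls by simp [cbTrimIf, hs']]
        rw [hrest]
        -- now two inserts into (pre ++ buf ++ [l]) ++ cbRec ls []
        rw [show ((pre.length + buf.length : Nat) : Int) = (((pre ++ buf).length : Nat) : Int) by simp]
        rw [show pre ++ buf ++ [l] ++ cbRec ls [] = (pre ++ buf) ++ (l :: cbRec ls []) by simp]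
        rw [PySem.List.insert_natCast ((pre ++ buf) ++ (l :: cbRec ls [])) (pre ++ buf).length "```"
              (by simp)]
        rw [List.take_left, List.drop_left]
        rw [show pre ++ buf ++ "```" :: l :: cbRec ls []
              = pre ++ (buf ++ "```" :: l :: cbRec ls []) by simp]
        rw [PySem.List.insert_natCast (pre ++ (buf ++ "```" :: l :: cbRec ls [])) pre.length "```"
              (by simp)]
        rw [List.take_left, List.drop_left]
        simp

-- ===== VERDICT (by name: the statement is the Claim_ definition above) =====
theorem convert_codeblock_spec : Claim_equal_convert_codeblock := by
  intro src _
  unfold Spec_convert_codeblock convert_codeblock convert_codeblock_alt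
  generalize (PySem.Str.split? src "\n").getD [] = ls
  have hA := cbA_loop ls [] none [] []
  simp only [List.nil_append, List.length_nil, Nat.cast_zero] at hA
  have hB := cbB_loop ls [] []
  simp only [List.nil_append] at hB
  have hF := cbFence_scan ls [] []
  simp only [List.nil_append, List.length_nil, Nat.add_zero, Nat.cast_zero, ite_true] at hF
  simp only [hA, hB]
  rw [List.zip_map', show (fun (a : Int × Int) => (Prod.fst a, Prod.snd a)) = id by
    funext a; simp]
  rw [List.map_id, List.foldl_reverse, show (cbScan 0 none ls).1.foldr
        (fun x y => PySem.List.insert (PySem.List.insert y x.2 "```") x.1 "```")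
        (List.map cbTrimIf ls)
      = cbFence (cbScan 0 none ls).1 (List.map cbTrimIf ls) from rfl, hF]
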